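-- pv_equiv track=rewrite | github.com/Jon-hattan/Intelligent-Rebar-Detailing | Preprocessors/Rectangle_subtraction.py | split_boxes_by_lines
-- ===== SOURCE A (Python) =====
-- def split_boxes_by_lines(boxes, lines, direction):
--     result = []
--     if direction == "horizontal":
--         for box in boxes:
--             x_min, y_min, x_max, y_max = box
--             splits = [y_min, y_max]
--             for y, x_start, x_end in lines:
--                 if y_min < y < y_max and x_start < x_max and x_end > x_min:
--                     splits.append(y)
--             splits = sorted(set(splits))
--             for i in range(len(splits) - 1):
--                 result.append((x_min, splits[i], x_max, splits[i+1]))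
--
--     if direction == "vertical":
--         for box in boxes:
--             x_min, y_min, x_max, y_max = box
--             splits = [x_min, x_max]
--             for x, y_start, y_end in lines:
--                 if x_min < x < x_max and y_start < y_max and y_end > y_min:
--                     splits.append(x)
--             splits = sorted(set(splits))
--             for i in range(len(splits) - 1):
--                 result.append((splits[i], y_min, splits[i+1], y_max))
--
--
--     return result
-- ===== SOURCE B (Python) =====
-- def _insert_cut(pieces, c):
--     # pieces is an ordered list of disjoint consecutive intervals; split the one
--     # strictly containing c (a no-op if c is already a boundary or outside).
--     for i, (u, v) in enumerate(pieces):
--         if u < c < v: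
--             return pieces[:i] + [(u, c), (c, v)] + pieces[i + 1:]
--     return pieces
--
--
-- def _split_interval(lo, hi, plo, phi, lines):
--     # Refine the interval between lo and hi by each qualifying line in turn,
--     # keeping the pieces in ascending order; no set, no sort.
--     pieces = [(min(lo, hi), max(lo, hi))] if lo != hi else []
--     for c, s, e in lines:
--         if lo < c < hi and s < phi and e > plo:
--             pieces = _insert_cut(pieces, c)
--     return pieces
--
--
-- def split_boxes_by_lines(boxes, lines, direction):
--     result = []
--     if direction == "horizontal":
--         for x_min, y_min, x_max, y_max in boxes:
--             for u, v in _split_interval(y_min, y_max, x_min, x_max, lines):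
--                 result.append((x_min, u, x_max, v))
--     elif direction == "vertical":
--         for x_min, y_min, x_max, y_max in boxes:
--             for u, v in _split_interval(x_min, x_max, y_min, y_max, lines):
--                 result.append((u, y_min, v, y_max))
--     return result
-- ===== Notes on version B (the rewrite author's own statement) =====
-- stated objective: alternative
-- what changed: Replaces A's collect-append-then-sorted(set(...))-then-index-pairs pipeline with incremental interval refinement: each box starts as a single ordered interval and every qualifying line splits in place the piece strictly containing its coordinate, so deduplication and ordering fall out of the data structure and no set or sort is ever built.
import Mathlib
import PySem

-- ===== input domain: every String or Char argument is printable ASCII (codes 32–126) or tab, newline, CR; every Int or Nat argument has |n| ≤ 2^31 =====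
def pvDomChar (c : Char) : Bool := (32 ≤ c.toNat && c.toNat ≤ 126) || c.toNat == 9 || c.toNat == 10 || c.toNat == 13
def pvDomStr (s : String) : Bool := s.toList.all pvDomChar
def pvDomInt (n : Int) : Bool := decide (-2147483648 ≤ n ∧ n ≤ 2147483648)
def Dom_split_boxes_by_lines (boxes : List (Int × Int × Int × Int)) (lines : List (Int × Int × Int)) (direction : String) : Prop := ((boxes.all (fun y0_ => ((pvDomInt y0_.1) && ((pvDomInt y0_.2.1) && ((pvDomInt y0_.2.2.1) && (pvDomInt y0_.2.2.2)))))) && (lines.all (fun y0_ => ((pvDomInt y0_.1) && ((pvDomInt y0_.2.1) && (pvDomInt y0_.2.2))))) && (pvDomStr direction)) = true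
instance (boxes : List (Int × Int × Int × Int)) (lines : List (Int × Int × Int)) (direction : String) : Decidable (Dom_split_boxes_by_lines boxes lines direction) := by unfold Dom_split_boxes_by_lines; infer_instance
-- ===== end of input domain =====

-- B replaces A's collect / sorted(set(...)) / index-pairs pipeline with incremental
-- interval refinement: each box starts as one ordered interval and every qualifying
-- line splits in place the piece strictly containing its coordinate; return value only.

-- ===== PORT A =====
-- named loop body of A's horizontal `for box in boxes` loop (a transliteration, body named for the proofs)
def aBodyH (lines : List (Int × Int × Int)) (result : List (Int × Int × Int × Int)) (box : Int × Int × Int × Int) : List (Int × Int × Int × Int) :=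
  match box with
  | (x_min, y_min, x_max, y_max) =>
    let splits : List Int := [y_min, y_max]
    let splits := lines.foldl (fun splits line =>
      match line with
      | (y, x_start, x_end) =>
        if y_min < y ∧ y < y_max ∧ x_start < x_max ∧ x_end > x_min then splits ++ [y] else splits) splits
    let splits := PySem.List.sorted (PySem.Set.ofList splits) (fun x => x)
    (PySem.List.pyRange 0 ((splits.length : Int) - 1)).foldl (fun result i =>
      result ++ [(x_min, PySem.List.pyGetD splits i 0, x_max, PySem.List.pyGetD splits (i+1) 0)]) result

-- named loop body of A's vertical `for box in boxes` loop
def aBodyV (lines : List (Int × Int × Int)) (result : List (Int × Int × Int × Int)) (box : Int × Int × Int × Int) : List (Int × Int × Int × Int) :=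
  match box with
  | (x_min, y_min, x_max, y_max) =>
    let splits : List Int := [x_min, x_max]
    let splits := lines.foldl (fun splits line =>
      match line with
      | (x, y_start, y_end) =>
        if x_min < x ∧ x < x_max ∧ y_start < y_max ∧ y_end > y_min then splits ++ [x] else splits) splits
    let splits := PySem.List.sorted (PySem.Set.ofList splits) (fun x => x)
    (PySem.List.pyRange 0 ((splits.length : Int) - 1)).foldl (fun result i =>
      result ++ [(PySem.List.pyGetD splits i 0, y_min, PySem.List.pyGetD splits (i+1) 0, y_max)]) result

def split_boxes_by_lines (boxes : List (Int × Int × Int × Int)) (lines : List (Int × Int × Int)) (direction : String) : List (Int × Int × Int × Int) :=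
  let result : List (Int × Int × Int × Int) := []
  let result := if direction = "horizontal" then boxes.foldl (aBodyH lines) result else result
  let result := if direction = "vertical" then boxes.foldl (aBodyV lines) result else result
  result

-- ===== PORT B =====
-- B's helper `_insert_cut`: split the piece strictly containing c (its early-return scan as recursion)
def insertCut (c : Int) : List (Int × Int) → List (Int × Int)
  | [] => []
  | (u, v) :: rest =>
    if u < c ∧ c < v then (u, c) :: (c, v) :: rest else (u, v) :: insertCut c rest

-- B's helper `_split_interval`
def splitInterval (lo hi plo phi : Int) (lines : List (Int × Int × Int)) : List (Int × Int) :=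
  let pieces : List (Int × Int) := if lo ≠ hi then [(min lo hi, max lo hi)] else []
  lines.foldl (fun pieces line =>
    match line with
    | (c, s, e) => if lo < c ∧ c < hi ∧ s < phi ∧ e > plo then insertCut c pieces else pieces) pieces

def split_boxes_by_lines_alt (boxes : List (Int × Int × Int × Int)) (lines : List (Int × Int × Int)) (direction : String) : List (Int × Int × Int × Int) :=
  let result : List (Int × Int × Int × Int) := []
  if direction = "horizontal" then
    boxes.foldl (fun result box =>
      match box with
      | (x_min, y_min, x_max, y_max) =>
        (splitInterval y_min y_max x_min x_max lines).foldl (fun result uv =>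
          result ++ [(x_min, uv.1, x_max, uv.2)]) result) result
  else if direction = "vertical" then
    boxes.foldl (fun result box =>
      match box with
      | (x_min, y_min, x_max, y_max) =>
        (splitInterval x_min x_max y_min y_max lines).foldl (fun result uv =>
          result ++ [(uv.1, y_min, uv.2, y_max)]) result) result
  else result

-- ===== PRECONDITION & SPEC =====
def Spec_split_boxes_by_lines (boxes : List (Int × Int × Int × Int)) (lines : List (Int × Int × Int)) (direction : String) (out : List (Int × Int × Int × Int)) : Prop := out = split_boxes_by_lines_alt boxes lines direction
instance (boxes : List (Int × Int × Int × Int)) (lines : List (Int × Int × Int)) (direction : String) (out : List (Int × Int × Int × Int)) : Decidable (Spec_split_boxes_by_lines boxes lines direction out) := by unfold Spec_split_boxes_by_lines; infer_instance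

-- ===== CLAIM (what is proved, stated in full; the proofs are below) =====
def Claim_equal_split_boxes_by_lines : Prop := ∀ (boxes : List (Int × Int × Int × Int)) (lines : List (Int × Int × Int)) (direction : String), Dom_split_boxes_by_lines boxes lines direction → Spec_split_boxes_by_lines boxes lines direction (split_boxes_by_lines boxes lines direction)

-- ===== LEMMAS AND PROOFS =====

-- the line-selection predicate both programs decide, as a Bool-valued filter
def pvP (lo hi plo phi : Int) (t : Int × Int × Int) : Bool :=
  decide (lo < t.1 ∧ t.1 < hi ∧ t.2.1 < phi ∧ t.2.2 > plo)

-- A's sorted cut set after a prefix of the qualifying cuts has been collected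
def pvSS (lo hi : Int) (cuts : List Int) : List Int :=
  PySem.List.sorted (PySem.Set.ofList ([lo, hi] ++ cuts)) (fun x => x)

-- proof-only mirror of insertCut on the endpoint list
def insList (c : Int) : List Int → List Int
  | a :: b :: rest => if a < c ∧ c < b then a :: c :: b :: rest else a :: insList c (b :: rest)
  | l => l

lemma foldA (lo hi plo phi : Int) (l : List (Int × Int × Int)) (acc : List Int) :
    l.foldl (fun splits line =>
      match line with
      | (y, a, b) => if lo < y ∧ y < hi ∧ a < phi ∧ b > plo then splits ++ [y] else splits) acc
    = acc ++ (l.filter (pvP lo hi plo phi)).map (·.1) := by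
  have h : (fun (splits : List Int) (line : Int × Int × Int) =>
      match line with
      | (y, a, b) => if lo < y ∧ y < hi ∧ a < phi ∧ b > plo then splits ++ [y] else splits)
      = fun splits t => if pvP lo hi plo phi t = true then splits ++ [t.1] else splits := by
    funext splits t
    obtain ⟨y, a, b⟩ := t
    simp [pvP]
  rw [h, PySem.List.foldl_append_if]

-- the sorted cut set is the unique strictly increasing list with those members
lemma pvSS_char (lo hi : Int) (cuts ys : List Int)
    (hp : ys.Pairwise (· < ·)) (hm : ∀ z, z ∈ ys ↔ z ∈ [lo, hi] ++ cuts) :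
    pvSS lo hi cuts = ys := by
  unfold pvSS
  apply PySem.List.sorted_eq_of_perm_of_pairwise_lt _ _ _ ?_ hp
  refine (List.perm_ext_iff_of_nodup hp.nodup (PySem.Set.nodup_ofList _)).mpr ?_
  intro z
  rw [PySem.Set.mem_ofList]
  exact hm z

lemma mem_pvSS (lo hi : Int) (cuts : List Int) (z : Int) :
    z ∈ pvSS lo hi cuts ↔ z = lo ∨ z = hi ∨ z ∈ cuts := by
  unfold pvSS
  rw [PySem.List.mem_sorted, PySem.Set.mem_ofList]
  simp

lemma pairs_eq {α : Type} (pts : List Int) (f : Int → Int → α) (acc : List α) :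
    (PySem.List.pyRange 0 ((pts.length : Int) - 1)).foldl (fun r i =>
      r ++ [f (PySem.List.pyGetD pts i 0) (PySem.List.pyGetD pts (i+1) 0)]) acc
    = acc ++ (pts.zip pts.tail).map (fun uv => f uv.1 uv.2) := by
  rw [PySem.List.foldl_append_singleton_eq_map]
  congr 1
  apply List.ext_getElem
  · simp [PySem.List.length_pyRange_one]
  · intro k hk1 hk2
    simp only [List.getElem_map]
    rw [PySem.List.getElem_pyRange_one]
    have hlen : k < pts.length - 1 := by
      simp [PySem.List.length_pyRange_one] at hk1; omega
    have h1 : PySem.List.pyGetD pts ((0 : Int) + (k : Int)) 0 = pts[k]'(by omega) := by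
      rw [PySem.List.pyGetD_eq_getElem pts 0 (by omega) (by omega)]
      congr 1; omega
    have h2 : PySem.List.pyGetD pts ((0 : Int) + (k : Int) + 1) 0 = pts[k+1]'(by omega) := by
      rw [PySem.List.pyGetD_eq_getElem pts 0 (by omega) (by omega)]
      congr 1; omega
    rw [h1, h2]
    have hzk : k < (pts.zip pts.tail).length := by simpa using hk2
    simp [List.getElem_zip, List.getElem_tail]

-- insList leaves a list alone when c is below every element
lemma insList_of_lt (c : Int) (pts : List Int) (h : ∀ z ∈ pts, c < z) : insList c pts = pts := by
  induction pts with
  | nil => rfl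
  | cons a t ih =>
    cases t with
    | nil => rfl
    | cons b r =>
      have hca : c < a := h a (by simp)
      rw [insList, if_neg (by omega)]
      rw [ih (fun z hz => h z (by simp [hz]))]

-- insList leaves a strictly sorted list alone when c is already an element
lemma insList_of_mem (c : Int) (pts : List Int) (hs : pts.Pairwise (· < ·)) (hc : c ∈ pts) :
    insList c pts = pts := by
  induction pts with
  | nil => rfl
  | cons a t ih =>
    cases t with
    | nil => rfl
    | cons b r =>
      have hab := List.pairwise_cons.mp hs
      rcases List.mem_cons.mp hc with hca | hct
      · subst hca
        rw [insList, if_neg (by omega)]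
        rw [insList_of_lt _ _ hab.1]
      · have hac : a < c := hab.1 c hct
        rw [insList, if_neg ?_]
        · rw [ih hab.2 hct]
        · rintro ⟨_, hcb⟩
          rcases List.mem_cons.mp hct with h1 | h2
          · omega
          · have := (List.pairwise_cons.mp hab.2).1 c h2; omega

-- inserting a new c strictly inside the span of a strictly sorted list
lemma insList_insert (c : Int) (pts : List Int) (hs : pts.Pairwise (· < ·))
    (ha : ∃ a ∈ pts, a < c) (hb : ∃ b ∈ pts, c < b) (hn : c ∉ pts) :
    (insList c pts).Perm (pts ++ [c]) ∧ (insList c pts).Pairwise (· < ·) := by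
  induction pts with
  | nil => simp at ha
  | cons a t ih =>
    have hcons := List.pairwise_cons.mp hs
    have hac : a < c := by
      obtain ⟨a', ha', hlt⟩ := ha
      rcases List.mem_cons.mp ha' with rfl | hmem
      · exact hlt
      · have := hcons.1 a' hmem; omega
    cases t with
    | nil =>
      obtain ⟨b, hbmem, hcb⟩ := hb
      simp at hbmem; omega
    | cons b r =>
      by_cases hcb : c < b
      · rw [insList, if_pos ⟨hac, hcb⟩]
        constructor
        · exact List.Perm.cons a (List.perm_append_singleton c (b :: r)).symm
        · refine List.pairwise_cons.mpr ⟨?_, List.pairwise_cons.mpr ⟨?_, hcons.2⟩⟩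
          · intro z hz
            rcases List.mem_cons.mp hz with rfl | hz'
            · exact hac
            · exact hcons.1 z hz'
          · intro z hz
            rcases List.mem_cons.mp hz with rfl | hz'
            · exact hcb
            · have := (List.pairwise_cons.mp hcons.2).1 z hz'; omega
      · have hbc : b < c := by
          have : c ≠ b := fun h => hn (by simp [h])
          omega
        have hb' : ∃ b' ∈ b :: r, c < b' := by
          obtain ⟨b', hb'mem, hcb'⟩ := hb
          rcases List.mem_cons.mp hb'mem with rfl | hmem
          · omega
          · exact ⟨b', hmem, hcb'⟩
        have ih' := ih hcons.2 ⟨b, by simp, hbc⟩ hb' (fun h => hn (by simp [h]))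
        rw [insList, if_neg (by omega)]
        refine ⟨List.Perm.cons a ih'.1, List.pairwise_cons.mpr ⟨?_, ih'.2⟩⟩
        intro z hz
        have : z ∈ (b :: r) ++ [c] := ih'.1.mem_iff.mp hz
        rcases List.mem_append.mp this with h1 | h2
        · exact hcons.1 z h1
        · simp at h2; omega

-- insList keeps the head
lemma insList_cons (c a : Int) (t : List Int) : ∃ t', insList c (a :: t) = a :: t' := by
  cases t with
  | nil => exact ⟨[], rfl⟩
  | cons b r =>
    rw [insList]
    split_ifs <;> exact ⟨_, rfl⟩

-- insertCut on consecutive pairs mirrors insList on the endpoints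
lemma insertCut_zip (c : Int) (pts : List Int) :
    insertCut c (pts.zip pts.tail) = (insList c pts).zip (insList c pts).tail := by
  induction pts with
  | nil => rfl
  | cons a t ih =>
    cases t with
    | nil => rfl
    | cons b r =>
      by_cases h : a < c ∧ c < b
      · rw [insList, if_pos h]
        show insertCut c ((a, b) :: (b :: r).zip r) = _
        rw [insertCut, if_pos h]
        rfl
      · rw [insList, if_neg h]
        show insertCut c ((a, b) :: (b :: r).zip r) = _
        rw [insertCut, if_neg h]
        obtain ⟨t', ht'⟩ := insList_cons c b r
        rw [ht'] at ih ⊢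
        simp only [List.tail_cons] at ih
        show (a, b) :: insertCut c ((b :: r).zip r) = (a, b) :: (b :: t').zip t'
        rw [ih]

-- appending one qualifying cut refines the sorted cut set exactly by insList
lemma pvSS_snoc (lo hi c : Int) (cuts : List Int) (hlo : lo < c) (hhi : c < hi) :
    pvSS lo hi (cuts ++ [c]) = insList c (pvSS lo hi cuts) := by
  have hpw : (pvSS lo hi cuts).Pairwise (· < ·) := PySem.List.sorted_ofList_pairwise_lt _
  have hmem := mem_pvSS lo hi cuts
  by_cases hc : c ∈ pvSS lo hi cuts
  · rw [insList_of_mem c _ hpw hc]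
    apply pvSS_char _ _ _ _ hpw
    intro z
    rw [hmem z]
    have hc' := (hmem c).mp hc
    simp only [List.mem_append, List.mem_cons, List.not_mem_nil, or_false]
    constructor
    · tauto
    · rintro ((h | h) | h | rfl)
      · exact Or.inl h
      · exact Or.inr (Or.inl h)
      · exact Or.inr (Or.inr h)
      · exact hc'
  · have hlo' : lo ∈ pvSS lo hi cuts := (hmem lo).mpr (Or.inl rfl)
    have hhi' : hi ∈ pvSS lo hi cuts := (hmem hi).mpr (Or.inr (Or.inl rfl))
    obtain ⟨hperm, hpw'⟩ :=
      insList_insert c _ hpw ⟨lo, hlo', hlo⟩ ⟨hi, hhi', hhi⟩ hc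
    apply pvSS_char _ _ _ _ hpw'
    intro z
    rw [hperm.mem_iff]
    simp only [List.mem_append, List.mem_cons, List.not_mem_nil, or_false]
    rw [hmem z]
    tauto

-- B's refinement loop state equals consecutive pairs of A's sorted cut set
lemma splitInterval_eq (lo hi plo phi : Int) (lines : List (Int × Int × Int)) :
    splitInterval lo hi plo phi lines
    = (pvSS lo hi ((lines.filter (pvP lo hi plo phi)).map (·.1))).zip
      (pvSS lo hi ((lines.filter (pvP lo hi plo phi)).map (·.1))).tail := by
  unfold splitInterval
  have hstep : (fun (pieces : List (Int × Int)) (line : Int × Int × Int) =>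
      match line with
      | (c, s, e) => if lo < c ∧ c < hi ∧ s < phi ∧ e > plo then insertCut c pieces else pieces)
      = fun pieces t => if pvP lo hi plo phi t = true then insertCut t.1 pieces else pieces := by
    funext pieces t
    obtain ⟨c, s, e⟩ := t
    simp [pvP]
  rw [hstep]
  induction lines using List.reverseRecOn with
  | nil =>
    simp only [List.filter_nil, List.map_nil, List.foldl_nil]
    by_cases h : lo = hi
    · subst h
      rw [if_neg (by simp)]
      rw [pvSS_char lo lo [] [lo] (by simp) (by intro z; simp)]
      rfl
    · rw [if_pos h]
      rw [pvSS_char lo hi [] [min lo hi, max lo hi]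
        (by refine List.pairwise_cons.mpr ⟨?_, List.pairwise_singleton _ _⟩
            intro z hz
            simp only [List.mem_singleton] at hz
            subst hz; omega)
        (by intro z
            simp only [List.mem_cons, List.mem_append, List.not_mem_nil, or_false]
            omega)]
      rfl
  | append_singleton l t ih =>
    rw [List.foldl_append, List.foldl_cons, List.foldl_nil, List.filter_append]
    by_cases hp : pvP lo hi plo phi t = true
    · have hpc : lo < t.1 ∧ t.1 < hi := by
        have := of_decide_eq_true hp
        exact ⟨this.1, this.2.1⟩
      rw [if_pos hp, ih]
      rw [insertCut_zip]
      have : [t].filter (pvP lo hi plo phi) = [t] := by simp [hp]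
      rw [this, List.map_append]
      simp only [List.map_cons, List.map_nil]
      rw [pvSS_snoc lo hi t.1 _ hpc.1 hpc.2]
    · rw [if_neg hp, ih]
      have : [t].filter (pvP lo hi plo phi) = [] := by simp [hp]
      rw [this, List.append_nil]

-- per box, A's horizontal body equals B's
lemma bodyH_eq (lines : List (Int × Int × Int)) (acc : List (Int × Int × Int × Int))
    (x_min y_min x_max y_max : Int) :
    aBodyH lines acc (x_min, y_min, x_max, y_max)
    = (splitInterval y_min y_max x_min x_max lines).foldl (fun r uv =>
        r ++ [(x_min, uv.1, x_max, uv.2)]) acc := by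
  simp only [aBodyH]
  rw [foldA]
  rw [show PySem.List.sorted
        (PySem.Set.ofList ([y_min, y_max] ++ (lines.filter (pvP y_min y_max x_min x_max)).map (·.1)))
        (fun x => x)
      = pvSS y_min y_max ((lines.filter (pvP y_min y_max x_min x_max)).map (·.1)) from rfl]
  rw [pairs_eq _ (fun u v => (x_min, u, x_max, v)) acc]
  rw [PySem.List.foldl_append_singleton_eq_map, splitInterval_eq]

-- per box, A's vertical body equals B's
lemma bodyV_eq (lines : List (Int × Int × Int)) (acc : List (Int × Int × Int × Int))
    (x_min y_min x_max y_max : Int) :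
    aBodyV lines acc (x_min, y_min, x_max, y_max)
    = (splitInterval x_min x_max y_min y_max lines).foldl (fun r uv =>
        r ++ [(uv.1, y_min, uv.2, y_max)]) acc := by
  simp only [aBodyV]
  rw [foldA]
  rw [show PySem.List.sorted
        (PySem.Set.ofList ([x_min, x_max] ++ (lines.filter (pvP x_min x_max y_min y_max)).map (·.1)))
        (fun x => x)
      = pvSS x_min x_max ((lines.filter (pvP x_min x_max y_min y_max)).map (·.1)) from rfl]
  rw [pairs_eq _ (fun u v => (u, y_min, v, y_max)) acc]
  rw [PySem.List.foldl_append_singleton_eq_map, splitInterval_eq]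

-- ===== VERDICT (by name: the statement is the Claim_ definition above) =====
theorem split_boxes_by_lines_spec : Claim_equal_split_boxes_by_lines := by
  intro boxes lines direction _
  unfold Spec_split_boxes_by_lines split_boxes_by_lines split_boxes_by_lines_alt
  have hfunH : aBodyH lines = (fun (result : List (Int × Int × Int × Int)) (box : Int × Int × Int × Int) =>
      match box with
      | (x_min, y_min, x_max, y_max) =>
        (splitInterval y_min y_max x_min x_max lines).foldl (fun result uv =>
          result ++ [(x_min, uv.1, x_max, uv.2)]) result) := by
    funext acc box
    obtain ⟨a, b, c, d⟩ := box
    exact bodyH_eq lines acc a b c d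
  have hfunV : aBodyV lines = (fun (result : List (Int × Int × Int × Int)) (box : Int × Int × Int × Int) =>
      match box with
      | (x_min, y_min, x_max, y_max) =>
        (splitInterval x_min x_max y_min y_max lines).foldl (fun result uv =>
          result ++ [(uv.1, y_min, uv.2, y_max)]) result) := by
    funext acc box
    obtain ⟨a, b, c, d⟩ := box
    exact bodyV_eq lines acc a b c d
  by_cases h1 : direction = "horizontal"
  · have h2 : ¬ direction = "vertical" := by subst h1; decide
    simp [h1, hfunH]
  · by_cases h2 : direction = "vertical"
    · simp [h2, hfunV]
    · simp [h1, h2]
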